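-- pv_equiv track=rewrite | github.com/ivgnk/Pyton-Codewars-Leetcode | Leetcode/2610_medi_Convert an Array Into a 2D Array With Conditions.py | findMatrix3
-- ===== SOURCE A (Python) =====
-- from collections import Counter
--
-- def findMatrix3(nums):
--     dd=dict(Counter(nums))
--     lst=sorted([[v,k] for k,v in dd.items()], reverse=True)
--     nm=lst[0][0]; d=lst[0][1]; ll=len(lst)
--     res=[[d]]*nm
--     for i in range(1,ll):
--         nm = lst[i][0]
--         d = lst[i][1]
--         for j in range(nm):
--             res[j]=res[j]+[d]
--     return res
-- ===== SOURCE B (Python) =====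
-- from collections import Counter
--
-- def findMatrix3(nums):
--     # Row-wise construction: sort (count, value) pairs descending once, then
--     # build each row r as the values whose count exceeds r.
--     pairs = sorted(((c, v) for v, c in Counter(nums).items()), reverse=True)
--     maxc = pairs[0][0]
--     return [[v for c, v in pairs if c > r] for r in range(maxc)]
-- ===== Notes on version B (the rewrite author's own statement) =====
-- stated objective: alternative
-- what changed: A scatters each value across the first `count` rows with repeated in-place row updates; B inverts the nesting and builds each row in one pass by filtering the descending-sorted (count, value) pairs, with no mutation.
import Mathlib
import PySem

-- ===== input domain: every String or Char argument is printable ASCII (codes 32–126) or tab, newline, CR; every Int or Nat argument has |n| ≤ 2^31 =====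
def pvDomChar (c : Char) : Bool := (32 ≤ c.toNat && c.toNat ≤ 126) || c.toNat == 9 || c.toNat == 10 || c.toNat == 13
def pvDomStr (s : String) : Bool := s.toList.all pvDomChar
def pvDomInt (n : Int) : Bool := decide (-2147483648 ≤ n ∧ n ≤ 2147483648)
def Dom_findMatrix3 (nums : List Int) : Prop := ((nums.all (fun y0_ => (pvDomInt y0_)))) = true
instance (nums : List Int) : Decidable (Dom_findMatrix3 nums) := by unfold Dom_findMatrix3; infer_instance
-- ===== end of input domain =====

-- B builds each row by filtering the descending-sorted (count, value) pairs instead of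
-- A's value-wise scatter with in-place row updates (objective: alternative decomposition).

-- ===== PORT A =====
-- Python's 2-element lists [v, k] are ported as pairs (v, k); sorted(..., reverse=True)
-- on them is PySem.List.sorted2 with keys fst, snd (Python list order = lexicographic).
def findMatrix3 (nums : List Int) : List (List Int) :=
  let dd := PySem.Dict.counter nums
  let lst := PySem.List.sorted2 (dd.items.map (fun kv => (kv.2, kv.1))) Prod.fst Prod.snd true
  match PySem.List.pyGet? lst 0 with
  | none => []   -- Python raises IndexError here (empty nums); excluded by Pre_
  | some p0 =>
    let ll : Int := PySem.List.len lst
    let res0 := PySem.List.pyRepeat [[p0.2]] p0.1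
    (PySem.List.pyRange 1 ll).foldl (fun res i =>
      let p := PySem.List.pyGetD lst i (0, 0)   -- i ∈ range(1, ll) is always in range
      (PySem.List.pyRange 0 p.1).foldl (fun r j =>
        -- j ∈ range(nm) so 0 ≤ j: toNat is exact; Python's res[j] = res[j] + [d]
        r.set j.toNat (r.getD j.toNat [] ++ [p.2])) res) res0

-- ===== PORT B =====
def findMatrix3_alt (nums : List Int) : List (List Int) :=
  let pairs := PySem.List.sorted2 ((PySem.Dict.counter nums).items.map (fun kv => (kv.2, kv.1))) Prod.fst Prod.snd true
  match PySem.List.pyGet? pairs 0 with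
  | none => []   -- Python raises IndexError here (empty nums); excluded by Pre_
  | some p0 =>
    (PySem.List.pyRange 0 p0.1).map (fun r =>
      (pairs.filter (fun cv => decide (r < cv.1))).map (fun cv => cv.2))

-- ===== PRECONDITION & SPEC =====
-- Pre_ excludes only the empty input list, on which Python A (and B alike) raises IndexError at its first subscript of the sorted pair list.
def Pre_findMatrix3 (nums : List Int) : Prop := nums ≠ []
instance (nums : List Int) : Decidable (Pre_findMatrix3 nums) := by unfold Pre_findMatrix3; infer_instance
def pvWitness_findMatrix3 : List Int := [1, 3, 4, 1, 2, 3, 1]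

def Spec_findMatrix3 (nums : List Int) (out : List (List Int)) : Prop := out = findMatrix3_alt nums
instance (nums : List Int) (out : List (List Int)) : Decidable (Spec_findMatrix3 nums out) := by unfold Spec_findMatrix3; infer_instance

-- ===== CLAIM (what is proved, stated in full; the proofs are below) =====
def Claim_equal_findMatrix3 : Prop := ∀ (nums : List Int), Dom_findMatrix3 nums → Pre_findMatrix3 nums → Spec_findMatrix3 nums (findMatrix3 nums)

-- ===== LEMMAS AND PROOFS =====

-- A's inner loop as a function of the (count, value) pair it distributes.
def stepA (res : List (List Int)) (p : Int × Int) : List (List Int) :=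
  (PySem.List.pyRange 0 p.1).foldl (fun r j =>
    r.set j.toNat (r.getD j.toNat [] ++ [p.2])) res

-- Python's reverse=True sort key [c, v] compares lexicographically: first components descend.
theorem before_eq :
    (fun (a b : Int × Int) => decide (b.1 < a.1) || !decide (a.1 < b.1) && decide (b.2 < a.2))
      = (fun a b => decide ((toLex b : Lex (Int × Int)) < toLex a)) := by
  funext a b
  by_cases h1 : b.1 < a.1 <;> by_cases h2 : a.1 < b.1 <;> by_cases h3 : b.2 < a.2 <;>
    simp [h1, h2, h3, Prod.Lex.lt_iff] <;> omega

theorem sorted2_rev_fst_desc (xs : List (Int × Int)) :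
    (PySem.List.sorted2 xs Prod.fst Prod.snd true).Pairwise (fun a b => b.1 ≤ a.1) := by
  have key : ∀ acc, acc.Pairwise (fun (a b : Int × Int) => (toLex b : Lex (Int × Int)) ≤ toLex a) →
      (xs.foldl (fun acc x => PySem.List.insertBy (fun a b => decide ((toLex b : Lex (Int × Int)) < toLex a)) x acc) acc).Pairwise
        (fun a b => (toLex b : Lex (Int × Int)) ≤ toLex a) := by
    induction xs with
    | nil => intro acc h; exact h
    | cons x t ih =>
      intro acc h
      exact ih _ (PySem.List.insertBy_pairwise_ge (fun p => (toLex p : Lex (Int × Int))) x acc h)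
  have h0 : (PySem.List.sorted2 xs Prod.fst Prod.snd true)
      = xs.foldl (fun acc x => PySem.List.insertBy (fun a b => decide ((toLex b : Lex (Int × Int)) < toLex a)) x acc) [] := by
    simp only [PySem.List.sorted2]
    rw [show (fun (a b : Int × Int) =>
        decide (Prod.fst b < Prod.fst a) || !decide (Prod.fst a < Prod.fst b) && decide (Prod.snd b < Prod.snd a)) = _ from before_eq]
    simp
  rw [h0]
  refine (key [] (List.Pairwise.nil)).imp ?_
  intro a b h
  have := Prod.Lex.le_iff (x := toLex b) (y := toLex a) |>.mp h
  simp only [ofLex_toLex] at this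
  rcases this with h' | ⟨h1, _⟩
  · exact le_of_lt h'
  · exact le_of_eq h1

-- A's inner loop appends v to the first n rows (Nat-indexed form).
theorem innerFold_eq (v : Int) : ∀ (n : Nat) (res : List (List Int)), n ≤ res.length →
    (List.range n).foldl (fun r j => r.set j (r.getD j [] ++ [v])) res
      = (res.take n).map (· ++ [v]) ++ res.drop n := by
  intro n
  induction n with
  | zero => intro res h; simp
  | succ n ih =>
    intro res h
    have hn : n < res.length := by omega
    rw [List.range_succ, List.foldl_append, ih res (by omega)]
    have hlen : ((res.take n).map (· ++ [v])).length = n := by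
      simp [List.length_take]; omega
    have hdrop : res.drop n = res[n] :: res.drop (n+1) := by
      rw [List.drop_eq_getElem_cons hn]
    have hgetD : ((res.take n).map (· ++ [v]) ++ res.drop n).getD n [] = res[n] := by
      rw [List.getD_append_right _ _ _ _ (le_of_eq hlen), hlen, Nat.sub_self, hdrop]
      simp [List.getElem?_eq_getElem hn]
    simp only [List.foldl_cons, List.foldl_nil, hgetD]
    rw [List.set_append_right _ _ (le_of_eq hlen), hlen, Nat.sub_self, hdrop]
    simp only [List.set_cons_zero]
    have hm : n < (res.map (· ++ [v])).length := by simp; omega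
    have htk : (res.map (· ++ [v])).take (n+1) = (res.map (· ++ [v])).take n ++ [res[n] ++ [v]] := by
      rw [List.take_add_one, List.getElem?_eq_getElem hm]
      simp
    simp only [List.map_take] at *
    rw [htk]
    simp

theorem stepA_eq (res : List (List Int)) (p : Int × Int) (h0 : 0 ≤ p.1)
    (hle : p.1 ≤ (res.length : Int)) :
    stepA res p = (res.take p.1.toNat).map (· ++ [p.2]) ++ res.drop p.1.toNat := by
  unfold stepA
  rw [show p.1 = ((p.1.toNat : Nat) : Int) from (Int.toNat_of_nonneg h0).symm,
    PySem.List.pyRange_zero_natCast, List.foldl_map]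
  have : (fun (r : List (List Int)) (k : Nat) =>
      r.set ((k : Int)).toNat (r.getD ((k : Int)).toNat [] ++ [p.2]))
      = fun r k => r.set k (r.getD k [] ++ [p.2]) := by
    funext r k; simp
  rw [this]
  simp only [Int.toNat_natCast]
  exact innerFold_eq p.2 p.1.toNat res (by omega)

theorem stepA_length (res : List (List Int)) (p : Int × Int) :
    (stepA res p).length = res.length := by
  unfold stepA
  generalize PySem.List.pyRange 0 p.1 = l
  induction l generalizing res with
  | nil => rfl
  | cons j t ih => simp only [List.foldl_cons]; rw [ih]; simp

theorem outer_length (Q : List (Int × Int)) : ∀ (res : List (List Int)),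
    (Q.foldl stepA res).length = res.length := by
  induction Q with
  | nil => intro res; rfl
  | cons p Q ih => intro res; rw [List.foldl_cons, ih, stepA_length]

theorem outer_getD (Q : List (Int × Int)) : ∀ (res : List (List Int)) (r : Nat),
    r < res.length → (∀ p ∈ Q, 0 ≤ p.1 ∧ p.1 ≤ (res.length : Int)) →
    (Q.foldl stepA res).getD r []
      = res.getD r [] ++ (Q.filter (fun p => decide ((r : Int) < p.1))).map (fun p => p.2) := by
  induction Q with
  | nil => intro res r hr _; simp
  | cons p Q ih =>
    intro res r hr hQ
    obtain ⟨hp0, hple⟩ := hQ p (by simp)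
    have hstep := stepA_eq res p hp0 hple
    have hslen : (stepA res p).length = res.length := stepA_length res p
    rw [List.foldl_cons, ih (stepA res p) r (by rw [hslen]; exact hr)
      (fun q hq => by have := hQ q (by simp [hq]); rw [hslen]; exact this)]
    have hcase : (stepA res p).getD r []
        = res.getD r [] ++ (if (r : Int) < p.1 then [p.2] else []) := by
      rw [hstep]
      by_cases hrc : r < p.1.toNat
      · have hrlen : r < ((res.take p.1.toNat).map (· ++ [p.2])).length := by
          simp [List.length_take]; omega
        rw [List.getD_append _ _ _ _ hrlen, if_pos (by omega)]
        rw [List.getD_eq_getElem _ _ hrlen]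
        simp [List.getElem_take, List.getElem?_eq_getElem hr]
      · have hrlen : ((res.take p.1.toNat).map (· ++ [p.2])).length ≤ r := by
          simp [List.length_take]; omega
        rw [List.getD_append_right _ _ _ _ hrlen, if_neg (by omega)]
        have hmin : ((res.take p.1.toNat).map (· ++ [p.2])).length = p.1.toNat := by
          simp [List.length_take]; omega
        rw [hmin, List.getD_eq_getElem _ _ (by simp [List.length_drop]; omega),
          List.getElem_drop, List.getD_eq_getElem _ _ hr]
        simp only [show p.1.toNat + (r - p.1.toNat) = r from by omega]
        simp
    rw [hcase]
    by_cases hf : (r : Int) < p.1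
    · simp [hf]
    · simp [hf]

-- Reading lst[i] for i in range(s, len lst) is just dropping the first s elements.
theorem map_getD_pyRange (l : List (Int × Int)) : ∀ (s : Nat), s ≤ l.length →
    (PySem.List.pyRange (s : Int) (l.length : Int)).map (fun i => PySem.List.pyGetD l i (0, 0))
      = l.drop s := by
  intro s hs
  induction hk : l.length - s generalizing s with
  | zero =>
    have : s = l.length := by omega
    subst this
    simp [PySem.List.pyRange, List.drop_length]
  | succ k ih =>
    have hlt : s < l.length := by omega
    rw [PySem.List.pyRange_one_cons (by exact_mod_cast hlt), List.map_cons,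
      show ((s : Int) + 1) = ((s + 1 : Nat) : Int) by push_cast; ring,
      ih (s + 1) (by omega) (by omega)]
    rw [PySem.List.pyGetD_natCast, List.getD_eq_getElem _ _ hlt,
      List.drop_eq_getElem_cons hlt]

-- ===== VERDICT (by name: the statement is the Claim_ definition above) =====
theorem findMatrix3_spec : Claim_equal_findMatrix3 := by
  intro nums _ hpre
  have hpre' : nums ≠ [] := hpre
  have hL : (PySem.Dict.counter nums).items.map (fun kv => (kv.2, kv.1))
      = (PySem.Set.ofList nums).map (fun k => ((nums.count k : Int), k)) := by
    rw [PySem.Dict.items_counter, List.map_map]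
    rfl
  have hperm := PySem.List.sorted2_perm
    ((PySem.Dict.counter nums).items.map (fun kv => (kv.2, kv.1))) Prod.fst Prod.snd true
  have hpos : ∀ p ∈ PySem.List.sorted2 ((PySem.Dict.counter nums).items.map (fun kv => (kv.2, kv.1)))
      Prod.fst Prod.snd true, 1 ≤ p.1 := by
    intro p hp
    have hmem := hperm.mem_iff.mp hp
    rw [hL] at hmem
    obtain ⟨k, hk, rfl⟩ := List.mem_map.mp hmem
    have hkn : k ∈ nums := (PySem.Set.mem_ofList nums k).mp hk
    have : 1 ≤ nums.count k := List.one_le_count_iff.mpr hkn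
    simp
    omega
  have hdesc := sorted2_rev_fst_desc ((PySem.Dict.counter nums).items.map (fun kv => (kv.2, kv.1)))
  unfold Spec_findMatrix3
  rcases hP : PySem.List.sorted2 ((PySem.Dict.counter nums).items.map (fun kv => (kv.2, kv.1)))
      Prod.fst Prod.snd true with _ | ⟨p0, rest⟩
  · -- impossible: nums ≠ [] means the sorted pair list is nonempty
    exfalso
    rw [hP] at hperm
    have hLnil : (PySem.Dict.counter nums).items.map (fun kv => (kv.2, kv.1)) = [] := by
      have hlen := hperm.length_eq
      exact List.length_eq_zero_iff.mp hlen.symm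
    rcases List.exists_cons_of_ne_nil hpre' with ⟨x, t, rfl⟩
    have hx : x ∈ PySem.Set.ofList (x :: t) := (PySem.Set.mem_ofList _ x).mpr (by simp)
    have hxL : ((((x :: t).count x : Int)), x)
        ∈ (PySem.Dict.counter (x :: t)).items.map (fun kv => (kv.2, kv.1)) := by
      rw [hL]
      exact List.mem_map.mpr ⟨x, hx, rfl⟩
    rw [hLnil] at hxL
    simp at hxL
  · rw [hP] at hpos hdesc
    have hget : PySem.List.pyGet? (p0 :: rest) 0 = some p0 := by
      simp [PySem.List.pyGet?, PySem.List.pyIdx?]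
    simp only [findMatrix3, findMatrix3_alt, hP, hget]
    have hrest_le : ∀ p ∈ rest, p.1 ≤ p0.1 := (List.pairwise_cons.mp hdesc).1
    have hrest_pos : ∀ p ∈ rest, 1 ≤ p.1 := fun p hp => hpos p (List.mem_cons_of_mem _ hp)
    have hc0 : 1 ≤ p0.1 := hpos p0 (by simp)
    -- A side: the indexed outer loop is a fold of stepA over rest
    have hlenlst : PySem.List.len (p0 :: rest) = (((p0 :: rest).length : Nat) : Int) := by
      simp [PySem.List.len]
    have hmap := map_getD_pyRange (p0 :: rest) 1 (by simp)
    have houter :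
        (PySem.List.pyRange 1 (PySem.List.len (p0 :: rest))).foldl (fun res i =>
          (PySem.List.pyRange 0 (PySem.List.pyGetD (p0 :: rest) i (0, 0)).1).foldl (fun r j =>
            r.set j.toNat (r.getD j.toNat [] ++ [(PySem.List.pyGetD (p0 :: rest) i (0, 0)).2])) res)
          (PySem.List.pyRepeat [[p0.2]] p0.1)
        = rest.foldl stepA (List.replicate p0.1.toNat [p0.2]) := by
      rw [PySem.List.pyRepeat_singleton]
      calc (PySem.List.pyRange 1 (PySem.List.len (p0 :: rest))).foldl _ _
          = ((PySem.List.pyRange ((1 : Nat) : Int) ((p0 :: rest).length : Int)).map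
              (fun i => PySem.List.pyGetD (p0 :: rest) i (0, 0))).foldl stepA
              (List.replicate p0.1.toNat [p0.2]) := by
            rw [List.foldl_map, hlenlst]
            norm_num
            rfl
        _ = rest.foldl stepA (List.replicate p0.1.toNat [p0.2]) := by
            rw [hmap]
            simp
    rw [houter]
    -- B side: rows as a map over a Nat range
    have hBrange := PySem.List.pyRange_zero_natCast p0.1.toNat
    rw [show ((p0.1.toNat : Nat) : Int) = p0.1 from Int.toNat_of_nonneg (by omega)] at hBrange
    rw [hBrange, List.map_map]
    -- elementwise equality
    have hAlen : (rest.foldl stepA (List.replicate p0.1.toNat [p0.2])).length = p0.1.toNat := by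
      rw [outer_length]
      simp
    apply List.ext_getElem
    · simp [hAlen]
    · intro r hr1 hr2
      have hrlt : r < p0.1.toNat := by simpa [hAlen] using hr1
      have hrepl : r < (List.replicate p0.1.toNat ([p0.2] : List Int)).length := by simp [hrlt]
      rw [← List.getD_eq_getElem _ ([] : List Int) hr1,
        outer_getD rest (List.replicate p0.1.toNat [p0.2]) r (by simpa using hrlt)
          (fun p hp => ⟨by have := hrest_pos p hp; omega, by
            simp only [List.length_replicate]
            rw [Int.toNat_of_nonneg (by omega)]
            exact hrest_le p hp⟩)]
      rw [List.getElem_map, List.getElem_range]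
      rw [List.getD_eq_getElem _ _ hrepl, List.getElem_replicate]
      simp only [Function.comp_apply]
      rw [List.filter_cons, if_pos (by simp; omega)]
      simp
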